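-- pv_equiv track=rewrite | github.com/alexandraback/datacollection | solutions_5706278382862336_1/Python/eXtreme/elfdesc.py | solve_elf_family
-- ===== SOURCE A (Python) =====
-- def solve_elf_family(P, Q):
--     if P == 0:
--         return 100
--
--     if P > Q:
--         raise ValueError()
--
--     if P == Q:
--         return 0
--
--     P *= 2
--     if P > Q:
--         return 1 + min(solve_elf_family(Q, Q), solve_elf_family(P-Q, Q))
--     else:
--         return 1 + min(solve_elf_family(0, Q), solve_elf_family(P, Q))
-- ===== SOURCE B (Python) =====
-- def solve_elf_family(P, Q):
--     if P == 0:
--         return 100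
--     if P > Q:
--         raise ValueError()
--     count = 0
--     while P < Q:
--         P *= 2
--         count += 1
--     return count
-- ===== Notes on version B (the rewrite author's own statement) =====
-- stated objective: simpler
-- what changed: Replaced A's branching recursion with min() combinations by a plain iterative loop that counts how many times P must double to reach Q; the min(solve(Q,Q),...)/min(solve(0,Q),...) branches collapse to a simple count.
import Mathlib
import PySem

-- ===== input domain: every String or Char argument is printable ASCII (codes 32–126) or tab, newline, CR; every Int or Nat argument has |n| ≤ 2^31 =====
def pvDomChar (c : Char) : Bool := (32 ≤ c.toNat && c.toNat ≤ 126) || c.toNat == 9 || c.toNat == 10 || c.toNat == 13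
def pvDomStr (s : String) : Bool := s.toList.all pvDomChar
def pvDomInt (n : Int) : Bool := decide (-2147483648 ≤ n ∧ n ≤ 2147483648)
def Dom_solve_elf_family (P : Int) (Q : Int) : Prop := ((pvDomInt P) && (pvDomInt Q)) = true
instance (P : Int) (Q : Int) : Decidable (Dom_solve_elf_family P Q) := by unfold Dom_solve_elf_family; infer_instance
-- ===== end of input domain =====

-- B replaces A's branching recursion (with min over extra recursive calls) by a plain
-- iterative doubling-count loop; objective: simpler.

-- ===== PORT A =====
-- A's recursion does not terminate on all inputs (Python raises RecursionError there);
-- fuel makes the port total. On every input admitted by Pre_ the value-relevant part of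
-- the recursion is far shallower than 100, so the fuel guard never shapes the result.
def solveElfRec : Nat → Int → Int → Int
  | 0, _, _ => 0
  | fuel+1, P, Q =>
    if P = 0 then 100
    else if P > Q then 0   -- Python raises ValueError here; excluded by Pre_
    else if P = Q then 0
    else
      let P2 := P * 2
      if P2 > Q then 1 + min (solveElfRec fuel Q Q) (solveElfRec fuel (P2 - Q) Q)
      else 1 + min (solveElfRec fuel 0 Q) (solveElfRec fuel P2 Q)

def solve_elf_family (P : Int) (Q : Int) : Int := solveElfRec 100 P Q

-- ===== PORT B =====
-- the while-loop of Source B; fuel makes it total (on Pre_ inputs it ends within 32 steps)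
def elfLoop : Nat → Int → Int → Int → Int
  | 0, _, _, count => count
  | fuel+1, P, Q, count =>
    if P < Q then elfLoop fuel (P * 2) Q (count + 1) else count

def solve_elf_family_alt (P : Int) (Q : Int) : Int :=
  if P = 0 then 100
  else if P > Q then 0   -- Python raises ValueError here; excluded by Pre_
  else elfLoop 100 P Q 0

-- ===== PRECONDITION & SPEC =====
-- the odd part of a natural number (the number with all factors of 2 removed);
-- structural fuel recursion (halving terminates within n steps) so it computes by `decide`
def pvOddPartAux : Nat → Nat → Nat
  | 0, n => n
  | f+1, n => if n % 2 = 0 ∧ n ≠ 0 then pvOddPartAux f (n / 2) else n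

def pvOddPart (n : Nat) : Nat := pvOddPartAux n n

-- Pre_ excludes exactly the inputs on which Python A raises: ValueError when P > Q, and
-- RecursionError when P < Q with P ≤ 0 < Q or with the odd part of Q not dividing P
-- (then A's remainder chain never reaches the P == Q base case). A returns on all of Pre_.
def Pre_solve_elf_family (P : Int) (Q : Int) : Prop :=
  P = 0 ∨ P = Q ∨ (0 < P ∧ P < Q ∧ (pvOddPart Q.toNat : Int) ∣ P)
instance (P : Int) (Q : Int) : Decidable (Pre_solve_elf_family P Q) := by
  unfold Pre_solve_elf_family; infer_instance

def pvWitness_solve_elf_family : Int × Int := (3, 12)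

def Spec_solve_elf_family (P : Int) (Q : Int) (out : Int) : Prop := out = solve_elf_family_alt P Q
instance (P : Int) (Q : Int) (out : Int) : Decidable (Spec_solve_elf_family P Q out) := by
  unfold Spec_solve_elf_family; infer_instance

-- ===== CLAIM (what is proved, stated in full; the proofs are below) =====
def Claim_equal_solve_elf_family : Prop := ∀ (P : Int) (Q : Int), Dom_solve_elf_family P Q → Pre_solve_elf_family P Q → Spec_solve_elf_family P Q (solve_elf_family P Q)

-- ===== LEMMAS AND PROOFS =====

theorem solveElfRec_succ (f : Nat) (P Q : Int) :
    solveElfRec (f + 1) P Q =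
      if P = 0 then 100
      else if P > Q then 0
      else if P = Q then 0
      else if P * 2 > Q then 1 + min (solveElfRec f Q Q) (solveElfRec f (P * 2 - Q) Q)
      else 1 + min (solveElfRec f 0 Q) (solveElfRec f (P * 2) Q) := rfl

theorem elfLoop_succ (f : Nat) (P Q c : Int) :
    elfLoop (f + 1) P Q c = if P < Q then elfLoop f (P * 2) Q (c + 1) else c := rfl

theorem solveElfRec_nonneg (f : Nat) (P Q : Int) : 0 ≤ solveElfRec f P Q := by
  induction f generalizing P Q with
  | zero => simp [solveElfRec]
  | succ f ih =>
    rw [solveElfRec_succ]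
    split_ifs
    · norm_num
    · norm_num
    · norm_num
    · have h := le_min (ih Q Q) (ih (P * 2 - Q) Q)
      linarith
    · have h := le_min (ih 0 Q) (ih (P * 2) Q)
      linarith

theorem elfLoop_acc (f : Nat) (P Q c : Int) : elfLoop f P Q c = c + elfLoop f P Q 0 := by
  induction f generalizing P c with
  | zero => simp [elfLoop]
  | succ f ih =>
    rw [elfLoop_succ, elfLoop_succ]
    split_ifs with h
    · rw [ih (P * 2) (c + 1), ih (P * 2) (0 + 1)]; ring
    · simp

theorem elfLoop_le (f : Nat) (P Q : Int) : elfLoop f P Q 0 ≤ (f : Int) := by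
  induction f generalizing P with
  | zero => simp [elfLoop]
  | succ f ih =>
    rw [elfLoop_succ]
    split_ifs with h
    · rw [elfLoop_acc]
      have := ih (P * 2)
      push_cast
      omega
    · positivity

theorem main_elf (f : Nat) (P Q : Int) (hf : f ≤ 99) (hP : 0 < P) (hPQ : P ≤ Q)
    (hQ : Q ≤ P * 2 ^ f) : solveElfRec (f + 1) P Q = elfLoop (f + 1) P Q 0 := by
  induction f generalizing P with
  | zero =>
    have hEq : P = Q := by simp only [pow_zero, mul_one] at hQ; omega
    subst hEq
    rw [solveElfRec_succ, elfLoop_succ]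
    simp [hP.ne']
  | succ f ih =>
    by_cases hEq : P = Q
    · subst hEq
      rw [solveElfRec_succ, elfLoop_succ]
      simp [hP.ne']
    · have hlt : P < Q := lt_of_le_of_ne hPQ hEq
      rw [solveElfRec_succ, elfLoop_succ, if_neg hP.ne', if_neg (not_lt.mpr hPQ),
        if_neg hEq, if_pos hlt]
      by_cases h2 : P * 2 > Q
      · -- first doubling already exceeds Q: A returns 1 + min 0 _, B stops after one step
        have hs : solveElfRec (f + 1) Q Q = 0 := by
          rw [solveElfRec_succ]
          simp [show Q ≠ 0 by omega]
        rw [if_pos h2, hs, min_eq_left (solveElfRec_nonneg _ _ _),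
          elfLoop_succ, if_neg (not_lt.mpr (le_of_lt h2))]
        omega
      · rw [if_neg h2]
        replace h2 : P * 2 ≤ Q := not_lt.mp h2
        have hQ2 : Q ≤ P * 2 * 2 ^ f := by
          have h : P * 2 ^ (f + 1) = P * 2 * 2 ^ f := by ring
          omega
        have hrec := ih (P * 2) (by omega) (by omega) h2 hQ2
        have h0 : solveElfRec (f + 1) 0 Q = 100 := by rw [solveElfRec_succ]; simp
        have hle : elfLoop (f + 1) (P * 2) Q 0 ≤ 100 := by
          have h1 := elfLoop_le (f + 1) (P * 2) Q
          push_cast at h1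
          omega
        rw [h0, hrec, min_eq_right hle, elfLoop_acc (f + 1) (P * 2) Q (0 + 1)]
        omega

-- ===== VERDICT (by name: the statement is the Claim_ definition above) =====
theorem solve_elf_family_spec : Claim_equal_solve_elf_family := by
  intro P Q hDom hPre
  unfold Spec_solve_elf_family solve_elf_family solve_elf_family_alt
  rcases hPre with h0 | hEq | ⟨hP, hlt, -⟩
  · subst h0; simp [solveElfRec]
  · subst hEq
    by_cases h0 : P = 0
    · subst h0; simp [solveElfRec]
    · rw [solveElfRec_succ]
      simp [elfLoop_succ, h0]
  · have hQbound : Q ≤ 2147483648 := by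
      unfold Dom_solve_elf_family pvDomInt at hDom
      simp only [Bool.and_eq_true, decide_eq_true_eq] at hDom
      omega
    have hQ : Q ≤ P * 2 ^ 99 := by
      have h1 : (1 : Int) ≤ P := hP
      have h2 : (2147483648 : Int) ≤ 2 ^ 99 := by norm_num
      have h3 : (1 : Int) * 2 ^ 99 ≤ P * 2 ^ 99 :=
        mul_le_mul_of_nonneg_right h1 (by positivity)
      linarith
    have h := main_elf 99 P Q (le_refl _) hP (le_of_lt hlt) hQ
    rw [if_neg (by omega : ¬ P = 0), if_neg (not_lt.mpr (le_of_lt hlt))]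
    exact h
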